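-- pv_equiv track=rewrite | github.com/eLifePathways/sciencebeam-grobid-metadata-enricher | src/grobid_metadata_enricher/pipeline.py | _preferred_front_matter_keywords
-- ===== SOURCE A (Python) =====
-- from typing import Any, Callable, Dict, List, Optional, Sequence, Tuple
--
-- def normalize_whitespace(text: str) -> str:
--     return " ".join((text or "").split())
--
-- def canonical_language_code(language: str) -> str:
--     value = (language or "").strip().lower()
--     if value in {"pt", "por"}:
--         return "pt"
--     if value in {"en", "eng"}:
--         return "en"
--     if value in {"es", "spa"}:
--         return "es"
--     return value or "unknown"
--
-- def _normalise_selection_key(value: str) -> str: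
--     return normalize_whitespace(value).casefold()
--
-- def _dedupe_strings(values: Sequence[str]) -> List[str]:
--     seen = set()
--     out: List[str] = []
--     for value in values:
--         text = str(value).strip()
--         key = _normalise_selection_key(text)
--         if not key or key in seen:
--             continue
--         seen.add(key)
--         out.append(text)
--     return out
--
-- def _preferred_front_matter_keywords(
--     candidate_sets: Sequence[Tuple[str, Sequence[str]]],
--     preferred_language: Optional[str],
-- ) -> List[str]:
--     front_sets: List[Tuple[str, List[str]]] = [
--         (source, _dedupe_strings([str(value) for value in values]))
--         for source, values in candidate_sets
--         if source.startswith("front_matter_llm")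
--     ]
--     front_sets = [(source, values) for source, values in front_sets if values]
--     if not front_sets:
--         return []
--     language = canonical_language_code(preferred_language or "")
--     for source, values in front_sets:
--         parts = source.split(":")
--         if len(parts) >= 2 and canonical_language_code(parts[1]) == "en":
--             return values
--     if language != "unknown":
--         for source, values in front_sets:
--             parts = source.split(":")
--             if len(parts) >= 2 and canonical_language_code(parts[1]) == language:
--                 return values
--     return front_sets[0][1]
-- ===== SOURCE B (Python) =====
-- from typing import List, Optional, Sequence, Tuple
--
-- def normalize_whitespace(text: str) -> str:
--     return " ".join((text or "").split())
--
-- def canonical_language_code(language: str) -> str: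
--     value = (language or "").strip().lower()
--     if value in {"pt", "por"}:
--         return "pt"
--     if value in {"en", "eng"}:
--         return "en"
--     if value in {"es", "spa"}:
--         return "es"
--     return value or "unknown"
--
-- def _normalise_selection_key(value: str) -> str:
--     return normalize_whitespace(value).casefold()
--
-- def _dedupe_strings(values: Sequence[str]) -> List[str]:
--     seen = set()
--     out: List[str] = []
--     for value in values:
--         text = str(value).strip()
--         key = _normalise_selection_key(text)
--         if not key or key in seen:
--             continue
--         seen.add(key)
--         out.append(text)
--     return out
--
-- def _preferred_front_matter_keywords(
--     candidate_sets: Sequence[Tuple[str, Sequence[str]]],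
--     preferred_language: Optional[str],
-- ) -> List[str]:
--     front_sets: List[Tuple[str, List[str]]] = []
--     for source, values in candidate_sets:
--         if source.startswith("front_matter_llm"):
--             deduped = _dedupe_strings([str(value) for value in values])
--             if deduped:
--                 front_sets.append((source, deduped))
--     if not front_sets:
--         return []
--     # one pass: first-occurrence table from canonical language code to values
--     table = {}
--     for source, values in front_sets:
--         parts = source.split(":")
--         if len(parts) >= 2:
--             table.setdefault(canonical_language_code(parts[1]), values)
--     if "en" in table:
--         return table["en"]
--     language = canonical_language_code(preferred_language or "")
--     if language != "unknown" and language in table: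
--         return table[language]
--     return front_sets[0][1]
-- ===== Notes on version B (the rewrite author's own statement) =====
-- stated objective: alternative
-- what changed: B builds front_sets with one explicit accumulating loop and then a single pass constructing a first-occurrence dict from canonical language code to values (dict.setdefault), replacing A's comprehension pair plus up to two further linear scans with constant-time table lookups for 'en' and the preferred language.
import Mathlib
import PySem

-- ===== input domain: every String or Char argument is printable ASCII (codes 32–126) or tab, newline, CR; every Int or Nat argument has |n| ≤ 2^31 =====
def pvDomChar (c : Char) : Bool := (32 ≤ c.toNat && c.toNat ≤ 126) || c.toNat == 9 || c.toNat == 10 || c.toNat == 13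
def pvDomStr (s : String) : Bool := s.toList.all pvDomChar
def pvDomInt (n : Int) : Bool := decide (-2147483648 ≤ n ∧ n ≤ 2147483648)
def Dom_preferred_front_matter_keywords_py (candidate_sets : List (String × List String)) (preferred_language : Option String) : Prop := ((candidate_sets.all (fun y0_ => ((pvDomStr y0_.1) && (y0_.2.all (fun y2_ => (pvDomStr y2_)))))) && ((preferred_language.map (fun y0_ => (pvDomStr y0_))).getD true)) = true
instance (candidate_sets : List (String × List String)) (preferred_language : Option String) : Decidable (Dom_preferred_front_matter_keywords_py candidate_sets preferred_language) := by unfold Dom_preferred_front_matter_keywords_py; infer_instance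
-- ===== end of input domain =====

-- B replaces A's three repeated linear scans over front_sets with a single pass that
-- builds a first-occurrence table from canonical language code to values, then looks up
-- 'en' / the preferred language in the table (objective: alternative data structure).

-- ===== PORT A =====
-- shared module helpers, transliterated once (both Pythons use the same module helpers)
-- normalize_whitespace: " ".join(text.split()); 'text or ""' is the identity on str input
def pvNormWS (text : String) : String := PySem.Str.join " " (PySem.Str.split₀ text)

-- canonical_language_code ('language or ""' is the identity on str input here)
def pvCanonLang (language : String) : String :=
  let value := PySem.Str.lower (PySem.Str.strip language)
  if value = "pt" ∨ value = "por" then "pt"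
  else if value = "en" ∨ value = "eng" then "en"
  else if value = "es" ∨ value = "spa" then "es"
  else if value = "" then "unknown" else value

-- _normalise_selection_key; casefold = lower, exact on the ASCII domain
def pvSelKey (value : String) : String := PySem.Str.lower (pvNormWS value)

-- _dedupe_strings (str(value) is the identity: values are strings)
def pvDedupe (values : List String) : List String :=
  (values.foldl (fun (st : PySem.Set String × List String) value =>
      let text := PySem.Str.strip value
      let key := pvSelKey text
      if key = "" ∨ PySem.Set.contains st.1 key then st
      else (PySem.Set.add st.1 key, st.2 ++ [text])) (PySem.Set.empty, [])).2

-- source.split(":"): sep ":" is nonempty, so split? is always some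
def pvSplitColon (source : String) : List String := (PySem.Str.split? source ":").getD []

-- 'len(parts) >= 2 and canonical_language_code(parts[1]) == code' (parts nonempty; getD 1 only read under the length test)
def pvLangMatch (code : String) (source : String) : Bool :=
  let parts := pvSplitColon source
  decide (2 ≤ parts.length) && (pvCanonLang (parts.getD 1 "") == code)

def preferred_front_matter_keywords_py (candidate_sets : List (String × List String)) (preferred_language : Option String) : List String :=
  -- the two comprehensions building and filtering front_sets
  let front_sets :=
    ((candidate_sets.filter (fun p => PySem.Str.startswith p.1 "front_matter_llm")).map
        (fun p => (p.1, pvDedupe p.2))).filter (fun p => !p.2.isEmpty)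
  if front_sets.isEmpty then []
  else
    let language := pvCanonLang (preferred_language.getD "")
    -- first for-loop with early return
    match front_sets.find? (fun p => pvLangMatch "en" p.1) with
    | some p => p.2
    | none =>
      if language ≠ "unknown" then
        -- second for-loop with early return
        match front_sets.find? (fun p => pvLangMatch language p.1) with
        | some p => p.2
        | none => (front_sets.headD ("", [])).2   -- front_sets[0][1]; nonempty here
      else (front_sets.headD ("", [])).2

-- ===== PORT B =====
-- B's single table-building pass (dict.setdefault: first occurrence wins)
def pvBuildTable (front_sets : List (String × List String)) : PySem.Dict String (List String) :=
  front_sets.foldl (fun t p =>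
    if 2 ≤ (pvSplitColon p.1).length then t.setdefault (pvCanonLang ((pvSplitColon p.1).getD 1 "")) p.2 else t)
    PySem.Dict.empty

def preferred_front_matter_keywords_py_alt (candidate_sets : List (String × List String)) (preferred_language : Option String) : List String :=
  -- B's explicit accumulating loop building front_sets
  let front_sets := candidate_sets.foldl (fun acc p =>
      if PySem.Str.startswith p.1 "front_matter_llm" then
        let deduped := pvDedupe p.2
        if !deduped.isEmpty then acc ++ [(p.1, deduped)] else acc
      else acc) []
  match front_sets with
  | [] => []
  | first :: _ =>
    let table := pvBuildTable front_sets
    match table.get? "en" with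
    | some v => v
    | none =>
      let language := pvCanonLang (preferred_language.getD "")
      if language ≠ "unknown" then
        match table.get? language with
        | some v => v
        | none => first.2
      else first.2

-- ===== PRECONDITION & SPEC =====
def Spec_preferred_front_matter_keywords_py (candidate_sets : List (String × List String)) (preferred_language : Option String) (out : List String) : Prop := out = preferred_front_matter_keywords_py_alt candidate_sets preferred_language
instance (candidate_sets : List (String × List String)) (preferred_language : Option String) (out : List String) : Decidable (Spec_preferred_front_matter_keywords_py candidate_sets preferred_language out) := by unfold Spec_preferred_front_matter_keywords_py; infer_instance

-- ===== CLAIM (what is proved, stated in full; the proofs are below) =====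
def Claim_equal_preferred_front_matter_keywords_py : Prop := ∀ (candidate_sets : List (String × List String)) (preferred_language : Option String), Dom_preferred_front_matter_keywords_py candidate_sets preferred_language → Spec_preferred_front_matter_keywords_py candidate_sets preferred_language (preferred_front_matter_keywords_py candidate_sets preferred_language)

-- ===== LEMMAS AND PROOFS =====

-- B's accumulating loop builds A's filtered-mapped-filtered front_sets (stated for any test q and transform g)
theorem pv_fold_build (l : List (String × List String)) (q : String → Bool) (g : List String → List String) (acc : List (String × List String)) :
    l.foldl (fun acc p =>
      if q p.1 then
        let deduped := g p.2
        if !deduped.isEmpty then acc ++ [(p.1, deduped)] else acc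
      else acc) acc
    = acc ++ (((l.filter (fun p => q p.1)).map (fun p => (p.1, g p.2))).filter (fun p => !p.2.isEmpty)) := by
  induction l generalizing acc with
  | nil => simp
  | cons hd tl ih =>
    rw [List.foldl_cons,
        show (if q hd.1 then
                (let deduped := g hd.2
                 if !deduped.isEmpty then acc ++ [(hd.1, deduped)] else acc)
              else acc)
           = (if q hd.1 ∧ g hd.2 ≠ [] then acc ++ [(hd.1, g hd.2)] else acc) from by
          by_cases hs : q hd.1 <;> by_cases hne : g hd.2 = [] <;> simp [hs, hne]]
    by_cases hs : q hd.1
    · by_cases hne : g hd.2 = []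
      · rw [if_neg (by simp [hne]), ih]; simp [hs, hne]
      · rw [if_pos ⟨hs, hne⟩, ih]; simp [hs, hne]
    · rw [if_neg (by simp [hs]), ih]; simp [hs]

-- the table lookup equals A's first-match scan, for any starting dict
set_option maxHeartbeats 1000000 in
theorem pv_table_get (front_sets : List (String × List String)) (t : PySem.Dict String (List String)) (c : String) :
    (front_sets.foldl (fun t p =>
        if 2 ≤ (pvSplitColon p.1).length then t.setdefault (pvCanonLang ((pvSplitColon p.1).getD 1 "")) p.2 else t) t).get? c
    = ((t.get? c).or ((front_sets.find? (fun p => pvLangMatch c p.1)).map Prod.snd)) := by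
  induction front_sets generalizing t with
  | nil => simp
  | cons hd tl ih =>
    simp only [List.foldl_cons]
    by_cases hlen : 2 ≤ (pvSplitColon hd.1).length
    · rw [if_pos hlen, ih]
      by_cases hc : pvCanonLang ((pvSplitColon hd.1).getD 1 "") = c
      · have hfind : pvLangMatch c hd.1 = true := by
          show (decide (2 ≤ (pvSplitColon hd.1).length) && (pvCanonLang ((pvSplitColon hd.1).getD 1 "") == c)) = true
          rw [decide_eq_true hlen, hc, Bool.true_and, beq_self_eq_true]
        have hstep2 : List.find? (fun p => pvLangMatch c p.1) (hd :: tl) = some hd :=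
          List.find?_cons_of_pos hfind
        rw [hstep2, hc, PySem.Dict.get?_setdefault_self]
        rcases ht : t.get? c with _ | v
        · simp
        · simp
      · have hfind : pvLangMatch c hd.1 = false := by
          show (decide (2 ≤ (pvSplitColon hd.1).length) && (pvCanonLang ((pvSplitColon hd.1).getD 1 "") == c)) = false
          rw [beq_eq_false_iff_ne.mpr hc, Bool.and_false]
        have hstep2 : List.find? (fun p => pvLangMatch c p.1) (hd :: tl) = List.find? (fun p => pvLangMatch c p.1) tl :=
          List.find?_cons_of_neg (by simp [hfind])
        rw [hstep2, PySem.Dict.get?_setdefault_of_ne _ _ (fun h => hc h.symm)]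
    · have hfind : pvLangMatch c hd.1 = false := by
        show (decide (2 ≤ (pvSplitColon hd.1).length) && (pvCanonLang ((pvSplitColon hd.1).getD 1 "") == c)) = false
        rw [decide_eq_false hlen, Bool.false_and]
      have hstep2 : List.find? (fun p => pvLangMatch c p.1) (hd :: tl) = List.find? (fun p => pvLangMatch c p.1) tl :=
        List.find?_cons_of_neg (by simp [hfind])
      rw [if_neg hlen, ih, hstep2]

-- ===== VERDICT (by name: the statement is the Claim_ definition above) =====
theorem preferred_front_matter_keywords_py_spec : Claim_equal_preferred_front_matter_keywords_py := by
  intro candidate_sets preferred_language _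
  unfold Spec_preferred_front_matter_keywords_py
  unfold preferred_front_matter_keywords_py preferred_front_matter_keywords_py_alt pvBuildTable
  rw [pv_fold_build candidate_sets (fun s => PySem.Str.startswith s "front_matter_llm") pvDedupe []]
  simp only [List.nil_append]
  generalize (((candidate_sets.filter (fun p => PySem.Str.startswith p.1 "front_matter_llm")).map
      (fun p => (p.1, pvDedupe p.2))).filter (fun p => !p.2.isEmpty)) = fs
  rcases fs with _ | ⟨first, rest⟩
  · simp
  · simp only [List.isEmpty_cons, Bool.false_eq_true, if_false]
    rw [pv_table_get, pv_table_get]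
    simp only [PySem.Dict.get?_empty, Option.none_or]
    rcases hen : (first :: rest).find? (fun p => pvLangMatch "en" p.1) with _ | pe
    · simp only [hen, Option.map_none]
      by_cases hl : pvCanonLang (preferred_language.getD "") = "unknown"
      · simp [hl]
      · simp only [hl, ne_eq, not_false_iff, if_true]
        rcases hlang : (first :: rest).find? (fun p => pvLangMatch (pvCanonLang (preferred_language.getD "")) p.1) with _ | pl
        · simp [hlang]
        · simp [hlang]
    · simp [hen]
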